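-- pv_equiv track=rewrite | github.com/ponjae/FPL-project | fplData/gameData.py | _current_gw_number
-- ===== SOURCE A (Python) =====
-- def _current_gw_number(all_fixtures):
--
--     # remove unscheduled games
--     all_fixtures.pop(None, None)
--     gws = sorted(all_fixtures.keys())
--
--     current_gw = -1
--
--     for gw in gws:
--         for game in all_fixtures[gw]:
--             if not game[0]:
--                 current_gw = gw
--                 break
--         else:
--             continue
--         break
--
--     return current_gw
-- ===== SOURCE B (Python) =====
-- def _current_gw_number(all_fixtures):
--     # remove unscheduled games (same mutation as A)
--     all_fixtures.pop(None, None)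
--     return min((gw for gw, games in all_fixtures.items()
--                 if any(not game[0] for game in games)),
--                default=-1)
-- ===== Notes on version B (the rewrite author's own statement) =====
-- stated objective: simpler
-- what changed: Replaces the explicit sort plus nested for/else/break scan with a single filter-the-items comprehension whose minimum (with the original no-unplayed-game default) is returned, removing the sort and the early-break control flow.
-- outside the precondition, e.g. on _current_gw_number({1: [[0]], 2: [[]]}): A returns 1, B raises IndexError
import Mathlib
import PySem

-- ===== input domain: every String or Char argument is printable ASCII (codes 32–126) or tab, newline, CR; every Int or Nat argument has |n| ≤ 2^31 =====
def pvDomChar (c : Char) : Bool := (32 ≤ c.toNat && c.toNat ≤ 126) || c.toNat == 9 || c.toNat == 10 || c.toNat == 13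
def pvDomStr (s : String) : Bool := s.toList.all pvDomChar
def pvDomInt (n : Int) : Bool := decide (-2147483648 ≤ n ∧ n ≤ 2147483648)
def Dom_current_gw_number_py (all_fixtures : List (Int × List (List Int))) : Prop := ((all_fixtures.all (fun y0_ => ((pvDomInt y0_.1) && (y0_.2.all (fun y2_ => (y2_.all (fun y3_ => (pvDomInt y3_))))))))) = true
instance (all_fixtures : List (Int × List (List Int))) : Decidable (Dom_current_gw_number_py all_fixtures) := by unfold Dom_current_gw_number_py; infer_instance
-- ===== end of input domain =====

-- B replaces A's sort-then-scan-with-break by filtering the dict items and taking their minimum (with A's no-match default); simpler, no sort.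
-- A mutates its argument via all_fixtures.pop(None, None); B performs the same mutation; equivalence is about the return value.

-- ===== PORT A =====
-- all_fixtures.pop(None, None): the Lean dict has Int keys only, so this is a no-op on the ported input.
-- inner 'for game in ...: if not game[0]: break' loop (true = an unplayed game was found)
def pvFindUnplayed : List (List Int) → Bool
  | [] => false
  | g :: rest => if (PySem.List.pyGet? g 0).getD 1 == 0 then true else pvFindUnplayed rest

-- all_fixtures[gw]: first-match association-list lookup
def pvLookup (d : List (Int × List (List Int))) (k : Int) : List (List Int) :=
  match d with
  | [] => []
  | p :: rest => if p.1 == k then p.2 else pvLookup rest k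

-- the outer for-loop with its break
def pvLoopA (d : List (Int × List (List Int))) : List Int → Int
  | [] => -1
  | gw :: rest => if pvFindUnplayed (pvLookup d gw) then gw else pvLoopA d rest

def current_gw_number_py (all_fixtures : List (Int × List (List Int))) : Int :=
  pvLoopA all_fixtures (PySem.List.sorted (all_fixtures.map Prod.fst) (fun x => x) false)

-- ===== PORT B =====
def current_gw_number_py_alt (all_fixtures : List (Int × List (List Int))) : Int :=
  let qual := (all_fixtures.filter
      (fun p => p.2.any (fun g => (PySem.List.pyGet? g 0).getD 1 == 0))).map Prod.fst
  match PySem.List.min? qual (fun x => x) with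
  | some m => m
  | none => -1

-- ===== PRECONDITION & SPEC =====
-- Pre_ excludes (a) inputs where some gameweek's game list contains an empty game not preceded by an
-- unplayed game — there Python's game[0] raises IndexError (in B always; in A only when the sorted scan
-- reaches that gameweek) — and (b) duplicate gameweek keys, which cannot occur in the Python dict this
-- association list encodes.
def Pre_current_gw_number_py (all_fixtures : List (Int × List (List Int))) : Prop :=
  (all_fixtures.map Prod.fst).Nodup ∧
  ∀ p ∈ all_fixtures, ∀ i, (h : i < p.2.length) → p.2[i] = [] →
    ((p.2.take i).any (fun g => !g.isEmpty && g.headI == 0)) = true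
instance (all_fixtures : List (Int × List (List Int))) : Decidable (Pre_current_gw_number_py all_fixtures) := by unfold Pre_current_gw_number_py; infer_instance
def pvWitness_current_gw_number_py : (List (Int × List (List Int))) :=
  [(2, [[1, 3], [0, 4]]), (1, [[1]])]
def Spec_current_gw_number_py (all_fixtures : List (Int × List (List Int))) (out : Int) : Prop := out = current_gw_number_py_alt all_fixtures
instance (all_fixtures : List (Int × List (List Int))) (out : Int) : Decidable (Spec_current_gw_number_py all_fixtures out) := by unfold Spec_current_gw_number_py; infer_instance

-- ===== CLAIM (what is proved, stated in full; the proofs are below) =====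
def Claim_equal_current_gw_number_py : Prop := ∀ (all_fixtures : List (Int × List (List Int))), Dom_current_gw_number_py all_fixtures → Pre_current_gw_number_py all_fixtures → Spec_current_gw_number_py all_fixtures (current_gw_number_py all_fixtures)

-- ===== LEMMAS AND PROOFS =====

lemma pvFindUnplayed_eq_any (games : List (List Int)) :
    pvFindUnplayed games = games.any (fun g => (PySem.List.pyGet? g 0).getD 1 == 0) := by
  induction games with
  | nil => rfl
  | cons g rest ih =>
    simp only [pvFindUnplayed, List.any_cons, ih]
    split_ifs with h
    · simp [h]
    · simp [h]

lemma pvLookup_eq_of_nodup (d : List (Int × List (List Int)))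
    (hnd : (d.map Prod.fst).Nodup) (p : Int × List (List Int)) (hp : p ∈ d) :
    pvLookup d p.1 = p.2 := by
  induction d with
  | nil => cases hp
  | cons q rest ih =>
    simp only [List.map_cons, List.nodup_cons] at hnd
    rcases List.mem_cons.mp hp with h | hp
    · subst h; simp [pvLookup]
    · have hne : q.1 ≠ p.1 := by
        intro h; exact hnd.1 (h ▸ List.mem_map_of_mem hp)
      simp only [pvLookup]
      rw [if_neg (by simpa using hne)]
      exact ih hnd.2 hp

lemma pvLoopA_eq_head_filter (d : List (Int × List (List Int))) (gws : List Int) :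
    pvLoopA d gws =
      match gws.filter (fun gw => pvFindUnplayed (pvLookup d gw)) with
      | [] => -1
      | x :: _ => x := by
  induction gws with
  | nil => rfl
  | cons gw rest ih =>
    simp only [pvLoopA, List.filter_cons]
    split_ifs with h
    · simp
    · simpa using ih

theorem current_gw_number_py_spec : Claim_equal_current_gw_number_py := by
  intro d _ hpre
  obtain ⟨hnd, _⟩ := hpre
  unfold Spec_current_gw_number_py current_gw_number_py current_gw_number_py_alt
  set P : Int → Bool := fun gw => pvFindUnplayed (pvLookup d gw) with hP
  -- B's qualifying keys equal the keys filtered by P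
  have hqual : (d.filter
        (fun p => p.2.any (fun g => (PySem.List.pyGet? g 0).getD 1 == 0))).map Prod.fst
      = (d.map Prod.fst).filter P := by
    rw [List.filter_map]
    congr 1
    apply List.filter_congr
    intro p hp
    simp only [Function.comp, hP, pvFindUnplayed_eq_any, pvLookup_eq_of_nodup d hnd p hp]
  simp only [hqual]
  rw [pvLoopA_eq_head_filter]
  -- sorted keys filtered by P vs min? of keys filtered by P
  have hperm : ((PySem.List.sorted (d.map Prod.fst) (fun x => x) false).filter P).Perm
      ((d.map Prod.fst).filter P) :=
    (PySem.List.sorted_perm (d.map Prod.fst) (fun x => x) false).filter P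
  have hpw : ((PySem.List.sorted (d.map Prod.fst) (fun x => x) false).filter P).Pairwise (· ≤ ·) := by
    have := PySem.List.sorted_pairwise (xs := d.map Prod.fst) (key := fun x => x)
    exact this.filter P
  cases hsf : (PySem.List.sorted (d.map Prod.fst) (fun x => x) false).filter P with
  | nil =>
    have : (d.map Prod.fst).filter P = [] := by
      have := hperm; rw [hsf] at this; exact this.symm.eq_nil
    rw [this]
    simp [PySem.List.min?]
  | cons m t =>
    have hmem : ∀ y ∈ (d.map Prod.fst).filter P, m ≤ y := by
      intro y hy
      have hy' : y ∈ m :: t := by rw [← hsf]; exact hperm.mem_iff.mpr hy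
      rw [hsf] at hpw
      rcases List.mem_cons.mp hy' with rfl | hy2
      · exact le_refl _
      · exact (List.pairwise_cons.mp hpw).1 y hy2
    have hne : (d.map Prod.fst).filter P ≠ [] := by
      intro h; rw [h] at hperm
      have h0 := hperm.eq_nil
      rw [hsf] at h0
      simp at h0
    cases hmin : PySem.List.min? ((d.map Prod.fst).filter P) (fun x => x) with
    | none =>
      exact absurd ((PySem.List.min?_eq_none_iff _ _).mp hmin) hne
    | some m' =>
      have h1 : m ≤ m' := hmem m' (PySem.List.min?_mem hmin)
      have h2 : m' ≤ m := by
        have := PySem.List.min?_isMin hmin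
        exact this m (hperm.mem_iff.mp (by rw [hsf]; exact List.mem_cons_self))
      simp [le_antisymm h1 h2]
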